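-- pv_equiv track=rewrite | github.com/wittnils/numerik0 | nichtNumerik0/n.ntictactoe.py | tie
-- ===== SOURCE A (Python) =====
-- def tie(feld, n, ende):
--     h = 0
--     for j in range(n):
--         for k in range(n):
--             if feld[j][k]!= ".":
--                 h += 1
--     if h == n**2:
--         ende = 3
--     return ende
-- ===== SOURCE B (Python) =====
-- def tie(feld, n, ende):
--     def board_full(j):
--         if j == n:
--             return True
--         row = feld[j]
--         if any(row[k] == "." for k in range(n)):
--             return False
--         return board_full(j + 1)
--     return 3 if board_full(0) else ende
-- ===== Notes on version B (the rewrite author's own statement) =====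
-- stated objective: alternative
-- what changed: Replaces the exhaustive cell counter compared against n**2 by a short-circuiting recursion over rows, each row decided by an any-scan that stops at the first empty cell; Pre_ excludes negative board sizes n, outside the function's natural domain, where A's empty loop returns ende unchanged while B's recursion runs off the end of the board and raises.
-- outside the precondition, e.g. on tie([], -1, 5): A returns 5, B raises IndexError
import Mathlib
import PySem

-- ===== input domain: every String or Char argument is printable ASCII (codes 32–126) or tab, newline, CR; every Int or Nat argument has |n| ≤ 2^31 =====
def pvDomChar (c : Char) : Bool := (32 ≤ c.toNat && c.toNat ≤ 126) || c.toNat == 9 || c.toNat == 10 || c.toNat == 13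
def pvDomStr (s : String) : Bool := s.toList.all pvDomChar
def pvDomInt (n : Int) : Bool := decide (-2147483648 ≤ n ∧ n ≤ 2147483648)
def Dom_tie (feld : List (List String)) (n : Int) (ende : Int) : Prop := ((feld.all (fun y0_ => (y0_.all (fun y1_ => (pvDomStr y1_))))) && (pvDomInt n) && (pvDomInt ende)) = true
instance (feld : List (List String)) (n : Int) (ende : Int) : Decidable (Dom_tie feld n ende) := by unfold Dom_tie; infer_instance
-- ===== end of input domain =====

-- B replaces A's exhaustive counter-vs-n² double loop by a short-circuiting recursion over
-- rows, each row decided by one membership test; objective: alternative decomposition.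

-- ===== PORT A =====
def tie (feld : List (List String)) (n : Int) (ende : Int) : Int :=
  -- h = 0; for j in range(n): for k in range(n): if feld[j][k] != ".": h += 1
  -- (indexing via pyGetD: exact inside Pre_tie, which excludes out-of-range access)
  let h : Int := (PySem.List.pyRange 0 n 1).foldl (fun h j =>
    (PySem.List.pyRange 0 n 1).foldl (fun h k =>
      if PySem.List.pyGetD (PySem.List.pyGetD feld j []) k "" ≠ "." then h + 1 else h) h) 0
  if h = n ^ 2 then 3 else ende

-- ===== PORT B =====
-- def board_full(j): if j == n: return True
--                    row = feld[j]
--                    if any(row[k] == "." for k in range(n)): return False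
--                    return board_full(j + 1)
-- (the extra fuel argument only makes the recursion structural; it is never exhausted)
def boardFullGo (feld : List (List String)) (n : Int) (fuel : Nat) (j : Int) : Bool :=
  match fuel with
  | 0 => true
  | Nat.succ fuel =>
    if j = n then true
    else if (PySem.List.pyRange 0 n 1).any
              (fun k => PySem.List.pyGetD (PySem.List.pyGetD feld j []) k "" == ".") then false
    else boardFullGo feld n fuel (j + 1)

def boardFull (feld : List (List String)) (n : Int) (j : Int) : Bool :=
  boardFullGo feld n ((n - j).toNat + 1) j

def tie_alt (feld : List (List String)) (n : Int) (ende : Int) : Int :=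
  if boardFull feld n 0 then 3 else ende

-- ===== PRECONDITION & SPEC =====
-- Pre_tie restricts to the natural domain of board sizes (0 ≤ n: negative n is outside the
-- function's purpose; A's empty loop still returns ende there while B's recursion runs off
-- the end of feld and raises) and to the boards on which feld[j][k] never raises IndexError.
def Pre_tie (feld : List (List String)) (n : Int) (ende : Int) : Prop :=
  0 ≤ n ∧ n ≤ (feld.length : Int) ∧ ∀ row ∈ feld.take n.toNat, n ≤ (row.length : Int)
instance (feld : List (List String)) (n : Int) (ende : Int) : Decidable (Pre_tie feld n ende) := by unfold Pre_tie; infer_instance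

def pvWitness_tie : List (List String) × Int × Int := ([["x", "."], ["o", "x"]], 2, 0)

def Spec_tie (feld : List (List String)) (n : Int) (ende : Int) (out : Int) : Prop := out = tie_alt feld n ende
instance (feld : List (List String)) (n : Int) (ende : Int) (out : Int) : Decidable (Spec_tie feld n ende out) := by unfold Spec_tie; infer_instance

-- ===== CLAIM (what is proved, stated in full; the proofs are below) =====
def Claim_equal_tie : Prop := ∀ (feld : List (List String)) (n : Int) (ende : Int), Dom_tie feld n ende → Pre_tie feld n ende → Spec_tie feld n ende (tie feld n ende)

-- ===== LEMMAS AND PROOFS =====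

-- Inner loop of A: counts the non-"." entries among the first m cells of a row.
lemma tie_inner (row : List String) (m : Nat) (hrow : m ≤ row.length) (h : Int) :
    (PySem.List.pyRange 0 (m : Int) 1).foldl
      (fun h k => if PySem.List.pyGetD row k "" ≠ "." then h + 1 else h) h
    = h + ((row.take m).countP (fun c => c != ".")) := by
  induction m generalizing h with
  | zero => simp
  | succ m ih =>
    have h1 : ((m : Int) + 1) = ((m + 1 : Nat) : Int) := by push_cast; ring
    rw [← h1, PySem.List.pyRange_one_succ_right (by positivity), List.foldl_append,
      ih (by omega)]
    have hm : m < row.length := by omega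
    simp only [List.foldl_cons, List.foldl_nil, PySem.List.pyGetD_natCast,
      List.getD_eq_getElem?_getD, List.getElem?_eq_getElem hm, Option.getD_some,
      List.take_add_one, List.countP_append]
    by_cases hc : row[m] = "."
    · simp [hc]
    · simp [hc]
      ring

-- Sum of per-row values, each bounded by m, reaches m * (number of rows) iff every value is m.
lemma sum_counts_eq (f : List String → Nat) (l : List (List String)) (m : Nat)
    (hle : ∀ row ∈ l, f row ≤ m) :
    ((l.map f).sum = m * l.length ↔ ∀ row ∈ l, f row = m) := by
  induction l with
  | nil => simp
  | cons r t ih =>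
    have hr := hle r (by simp)
    have ht : ∀ row ∈ t, f row ≤ m := fun row hrow => hle row (List.mem_cons_of_mem _ hrow)
    have hsum : (t.map f).sum ≤ m * t.length := by
      have := List.sum_le_card_nsmul (t.map f) m (by
        intro x hx
        obtain ⟨row, hrow, rfl⟩ := List.mem_map.mp hx
        exact ht row hrow)
      simpa [smul_eq_mul, Nat.mul_comm] using this
    have hexp : m * (t.length + 1) = m * t.length + m := by ring
    simp only [List.map_cons, List.sum_cons, List.length_cons, hexp]
    constructor
    · intro hEq row hrow
      have h1 : f r = m ∧ (t.map f).sum = m * t.length := by omega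
      rcases List.mem_cons.mp hrow with rfl | hrow'
      · exact h1.1
      · exact (ih ht).mp h1.2 row hrow'
    · intro hall
      rw [hall r (by simp), (ih ht).mpr (fun row hrow => hall row (List.mem_cons_of_mem _ hrow))]
      ring

-- B's inner any-scan over one row equals a contains-test on the row's first m cells.
lemma row_any (row : List String) (m : Nat) (hrow : m ≤ row.length) :
    (PySem.List.pyRange 0 (m : Int) 1).any (fun k => PySem.List.pyGetD row k "" == ".")
      = (row.take m).contains "." := by
  induction m with
  | zero => simp
  | succ m ih =>
    have h1 : ((m : Int) + 1) = ((m + 1 : Nat) : Int) := by push_cast; ring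
    rw [← h1, PySem.List.pyRange_one_succ_right (by positivity), List.any_append,
      ih (by omega)]
    have hm : m < row.length := by omega
    simp only [List.any_cons, List.any_nil, Bool.or_false, PySem.List.pyGetD_natCast,
      List.getD_eq_getElem?_getD, List.getElem?_eq_getElem hm, Option.getD_some]
    have ht : row.take (m + 1) = row.take m ++ [row[m]] := by
      rw [List.take_add_one, List.getElem?_eq_getElem hm]
      rfl
    rw [ht, List.contains_append]
    congr 1
    simp only [List.contains_eq_mem, List.mem_singleton]
    rw [Bool.eq_iff_iff]
    simp only [beq_iff_eq, decide_eq_true_eq]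
    exact eq_comm

-- B's recursion from row i decides "no '.' in any later row of the n×n board".
lemma go_eq (feld : List (List String)) (m : Nat) (hm : m ≤ feld.length)
    (hr : ∀ row ∈ feld.take m, m ≤ row.length) :
    ∀ (k i : Nat), i + k = m →
      boardFullGo feld (m : Int) (k + 1) (i : Int)
        = ((feld.take m).drop i).all (fun row => !((row.take m).contains ".")) := by
  intro k
  induction k with
  | zero =>
    intro i hi
    have : i = m := by omega
    subst this
    rw [boardFullGo, if_pos rfl, List.drop_eq_nil_of_le (by
      simp [List.length_take])]
    simp
  | succ k ih =>
    intro i hi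
    have him : i < m := by omega
    have hilen : i < (feld.take m).length := by
      simp [List.length_take]; omega
    have hmem : feld[i] ∈ feld.take m := by
      have : (feld.take m)[i] ∈ feld.take m := List.getElem_mem hilen
      rwa [List.getElem_take] at this
    rw [boardFullGo, if_neg (by omega)]
    have h1 : (i : Int) + 1 = ((i + 1 : Nat) : Int) := by push_cast; ring
    rw [h1, ih (i + 1) (by omega)]
    have hrowtest : ((PySem.List.pyRange 0 (m : Int) 1).any
        (fun k => PySem.List.pyGetD (PySem.List.pyGetD feld (i : Int) []) k "" == "."))
        = (feld[i].take m).contains "." := by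
      simp only [PySem.List.pyGetD_eq_getElem feld [] (by omega : (0:Int) ≤ (i : Int))
        (by push_cast; omega), Int.toNat_natCast]
      exact row_any feld[i] m (hr _ hmem)
    simp only [hrowtest]
    rw [List.drop_eq_getElem_cons hilen, List.all_cons, List.getElem_take]
    cases hc : (feld[i].take m).contains "." <;> simp [hc]

theorem tie_eq_alt (feld : List (List String)) (n : Int) (ende : Int)
    (hpre : Pre_tie feld n ende) : tie feld n ende = tie_alt feld n ende := by
  obtain ⟨hn0, hnlen, hrows⟩ := hpre
  lift n to Nat using hn0 with m
  rw [Int.toNat_natCast] at hrows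
  have hmlen : m ≤ feld.length := by omega
  unfold tie tie_alt
  -- A's outer loop, folded over the first m rows
  have houter :
      (PySem.List.pyRange 0 (m : Int) 1).foldl (fun h j =>
        (PySem.List.pyRange 0 (m : Int) 1).foldl (fun h k =>
          if PySem.List.pyGetD (PySem.List.pyGetD feld j []) k "" ≠ "." then h + 1 else h) h) (0 : Int)
      = ((feld.take m).map (fun row => ((row.take m).countP (fun c => c != ".") : Int))).sum := by
    have hlen : (((feld.take m).length : Nat) : Int) = (m : Int) := by
      simp [List.length_take, Nat.min_eq_left hmlen]
    calc (PySem.List.pyRange 0 (m : Int) 1).foldl (fun h j =>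
            (PySem.List.pyRange 0 (m : Int) 1).foldl (fun h k =>
              if PySem.List.pyGetD (PySem.List.pyGetD feld j []) k "" ≠ "." then h + 1 else h) h) (0 : Int)
        = (PySem.List.pyRange 0 (((feld.take m).length : Nat) : Int) 1).foldl (fun h j =>
            (PySem.List.pyRange 0 (m : Int) 1).foldl (fun h k =>
              if PySem.List.pyGetD (PySem.List.pyGetD (feld.take m) j []) k "" ≠ "." then h + 1 else h) h) (0 : Int) := by
          rw [hlen]
          apply PySem.List.foldl_congr_mem
          intro acc j hj
          have hj' := (PySem.List.mem_pyRange_one).mp hj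
          have hjm : PySem.List.pyGetD feld j [] = PySem.List.pyGetD (feld.take m) j [] := by
            rw [PySem.List.pyGetD_eq_getElem feld [] (by omega) (by push_cast; omega),
              PySem.List.pyGetD_eq_getElem (feld.take m) [] (by omega)
                (by push_cast; rw [List.length_take, Nat.min_eq_left hmlen]; omega)]
            rw [List.getElem_take]
          rw [hjm]
        _ = (feld.take m).foldl (fun h row =>
              (PySem.List.pyRange 0 (m : Int) 1).foldl (fun h k =>
                if PySem.List.pyGetD row k "" ≠ "." then h + 1 else h) h) (0 : Int) :=
          PySem.List.foldl_pyRange_zero_pyGetD' (feld.take m) []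
            (fun h row => (PySem.List.pyRange 0 (m : Int) 1).foldl (fun h k =>
                if PySem.List.pyGetD row k "" ≠ "." then h + 1 else h) h) (0 : Int)
        _ = (feld.take m).foldl (fun h row => h + ((row.take m).countP (fun c => c != ".") : Int)) (0 : Int) := by
          apply PySem.List.foldl_congr_mem
          intro h row hrow
          exact tie_inner row m (by have := hrows row hrow; omega) h
        _ = ((feld.take m).map (fun row => ((row.take m).countP (fun c => c != ".") : Int))).sum := by
          rw [PySem.List.foldl_add]
          ring
  rw [houter]
  have hcount_le : ∀ row ∈ feld.take m, ((row.take m).countP (fun c => c != ".")) ≤ m := by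
    intro row hrow
    calc (row.take m).countP (fun c => c != ".") ≤ (row.take m).length := List.countP_le_length
      _ ≤ m := List.length_take_le m row
  have hfulliff : ∀ row ∈ feld.take m,
      ((row.take m).countP (fun c => c != ".") = m ↔ "." ∉ row.take m) := by
    intro row hrow
    have hlen : (row.take m).length = m := by
      have := hrows row hrow
      simp only [List.length_take]
      omega
    constructor
    · intro h hmem
      have hall := List.countP_eq_length.mp (h.trans hlen.symm)
      have := hall "." hmem
      simp at this
    · intro hnm
      have : (row.take m).countP (fun c => c != ".") = (row.take m).length :=
        List.countP_eq_length.mpr (fun c hc => by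
          simp only [bne_iff_ne, ne_eq]
          rintro rfl
          exact hnm hc)
      rw [this, hlen]
  have hnat : ((feld.take m).map (fun row => ((row.take m).countP (fun c => c != ".") : Int))).sum
      = ((((feld.take m).map (fun row => ((row.take m).countP (fun c => c != ".") : Nat))).sum : Nat) : Int) := by
    rw [Nat.cast_list_sum, List.map_map]
    rfl
  rw [hnat]
  have hsq : ((m : Int)) ^ 2 = ((m * m : Nat) : Int) := by push_cast; ring
  rw [hsq]
  have hlenfeld : (feld.take m).length = m := by simp [List.length_take, Nat.min_eq_left hmlen]
  have halt : boardFull feld (m : Int) 0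
      = (feld.take m).all (fun row => !((row.take m).contains ".")) := by
    have hf : (((m : Int) - 0).toNat) = m := by omega
    rw [boardFull, hf]
    have := go_eq feld m hmlen
      (fun row hrow => by have := hrows row hrow; omega) m 0 (by omega)
    simpa using this
  have hkey : (((feld.take m).map (fun row => (row.take m).countP (fun c => c != "."))).sum = m * m)
      ↔ (feld.take m).all (fun row => !((row.take m).contains ".")) = true := by
    have hsc := sum_counts_eq (fun row => (row.take m).countP (fun c => c != "."))
      (feld.take m) m hcount_le
    rw [hlenfeld] at hsc
    rw [hsc, List.all_eq_true]
    constructor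
    · intro hall row hrow
      have := (hfulliff row hrow).mp (hall row hrow)
      simpa [List.contains_eq_mem] using this
    · intro hall row hrow
      exact (hfulliff row hrow).mpr (by simpa [List.contains_eq_mem] using hall row hrow)
  rw [halt]
  by_cases hb : (feld.take m).all (fun row => !((row.take m).contains ".")) = true
  · rw [if_pos (by rw [Nat.cast_inj]; exact hkey.mpr hb), if_pos hb]
  · rw [if_neg (by rw [Nat.cast_inj]; exact fun h => hb (hkey.mp h)), if_neg hb]

-- ===== VERDICT (by name: the statement is the Claim_ definition above) =====
theorem tie_spec : Claim_equal_tie := by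
  intro feld n ende _ hpre
  unfold Spec_tie
  exact tie_eq_alt feld n ende hpre
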